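-- pv_equiv track=rewrite | github.com/Ayhan91691/Capstone_Martin_Ayhan | notebooks/streamlit_app/ml_functions/3_AI_summary_solution_features.py | extract_preview_lists
-- ===== SOURCE A (Python) =====
-- def extract_preview_lists(markdown_text: str):
--     lines = [line.strip() for line in markdown_text.splitlines()]
--
--     problems = []
--     general_ideas = []
--     tech_ideas = []
--
--     current_section = None
--
--     for line in lines:
--         if not line:
--             continue
--
--         lower = line.lower()
--
--         if "## problems and categories" in lower:
--             current_section = "top"
--             continue
--         if "## general app ideas" in lower:
--             current_section = "general"
--             continue
--         if "## technical / programming suggestions" in lower: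
--             current_section = "tech"
--             continue
--
--         if line.startswith("## "):
--             current_section = None
--
--         if current_section == "top" and line.startswith("- ") and len(problems) < 5:
--             problems.append(line[2:].strip())
--
--         if current_section == "general" and line.startswith("- ") and len(general_ideas) < 5:
--             general_ideas.append(line[2:].strip())
--
--         if current_section == "tech" and line.startswith("- ") and len(tech_ideas) < 5:
--             tech_ideas.append(line[2:].strip())
--
--     return problems, general_ideas, tech_ideas
-- ===== SOURCE B (Python) =====
-- def _bullets(lines):
--     return [l[2:].strip() for l in lines if l.startswith("- ")][:5]
--
--
-- def extract_preview_lists(markdown_text: str):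
--     # Phase 1: collect every non-empty line belonging to a known section.
--     top_lines, general_lines, tech_lines = [], [], []
--     current = None
--     for raw in markdown_text.splitlines():
--         line = raw.strip()
--         if not line:
--             continue
--         lower = line.lower()
--         if "## problems and categories" in lower:
--             current = "top"
--             continue
--         if "## general app ideas" in lower:
--             current = "general"
--             continue
--         if "## technical / programming suggestions" in lower:
--             current = "tech"
--             continue
--         if line.startswith("## "):
--             current = None
--         if current == "top":
--             top_lines.append(line)
--         elif current == "general":
--             general_lines.append(line)
--         elif current == "tech":
--             tech_lines.append(line)
--     # Phase 2: extract the first five bullets of each section.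
--     return _bullets(top_lines), _bullets(general_lines), _bullets(tech_lines)
-- ===== Notes on version B (the rewrite author's own statement) =====
-- stated objective: alternative
-- what changed: A interleaves capped bullet extraction inside its line-scanning state machine; B first collects all lines of each known section in one pass, then in a separate phase filters the bullet lines, strips the prefix and takes the first five per section.
import Mathlib
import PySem

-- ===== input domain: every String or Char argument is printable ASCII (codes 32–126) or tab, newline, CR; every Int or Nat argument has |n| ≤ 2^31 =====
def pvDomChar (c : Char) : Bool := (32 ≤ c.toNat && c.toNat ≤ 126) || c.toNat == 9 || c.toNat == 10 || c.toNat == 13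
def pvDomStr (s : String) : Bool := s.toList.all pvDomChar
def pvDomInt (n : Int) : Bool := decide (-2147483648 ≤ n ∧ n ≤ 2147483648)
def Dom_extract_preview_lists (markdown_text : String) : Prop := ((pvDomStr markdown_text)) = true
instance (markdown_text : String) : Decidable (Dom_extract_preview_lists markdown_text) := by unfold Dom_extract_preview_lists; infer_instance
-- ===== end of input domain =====

-- B separates concerns: one pass collects every line of each known section, a second
-- phase filters the '- ' bullets and takes the first five; A caps and extracts inline.

-- ===== PORT A =====
-- state: (problems, general_ideas, tech_ideas, current_section)
def pvStepA (st : List String × List String × List String × Option String) (line : String) :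
    List String × List String × List String × Option String :=
  if line = "" then st
  else
    let lower := PySem.Str.lower line
    if PySem.Str.isIn "## problems and categories" lower then (st.1, st.2.1, st.2.2.1, some "top")
    else if PySem.Str.isIn "## general app ideas" lower then (st.1, st.2.1, st.2.2.1, some "general")
    else if PySem.Str.isIn "## technical / programming suggestions" lower then (st.1, st.2.1, st.2.2.1, some "tech")
    else
      let cur := if PySem.Str.startswith line "## " then none else st.2.2.2
      let problems := if cur = some "top" ∧ PySem.Str.startswith line "- " = true ∧ st.1.length < 5
        then st.1 ++ [PySem.Str.strip (PySem.Str.slice line (some 2) none)] else st.1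
      let general := if cur = some "general" ∧ PySem.Str.startswith line "- " = true ∧ st.2.1.length < 5
        then st.2.1 ++ [PySem.Str.strip (PySem.Str.slice line (some 2) none)] else st.2.1
      let tech := if cur = some "tech" ∧ PySem.Str.startswith line "- " = true ∧ st.2.2.1.length < 5
        then st.2.2.1 ++ [PySem.Str.strip (PySem.Str.slice line (some 2) none)] else st.2.2.1
      (problems, general, tech, cur)

def extract_preview_lists (markdown_text : String) : List String × List String × List String :=
  let lines := (PySem.Str.splitlines markdown_text).map PySem.Str.strip
  let st := lines.foldl pvStepA ([], [], [], none)
  (st.1, st.2.1, st.2.2.1)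

-- ===== PORT B =====
-- _bullets: take the first 5 '- ' lines, with the prefix removed and stripped
def pvBullets (ls : List String) : List String :=
  ((ls.filter (fun l => PySem.Str.startswith l "- ")).map
    (fun l => PySem.Str.strip (PySem.Str.slice l (some 2) none))).take 5

-- state: (top_lines, general_lines, tech_lines, current)
def pvStepB (st : List String × List String × List String × Option String) (raw : String) :
    List String × List String × List String × Option String :=
  let line := PySem.Str.strip raw
  if line = "" then st
  else
    let lower := PySem.Str.lower line
    if PySem.Str.isIn "## problems and categories" lower then (st.1, st.2.1, st.2.2.1, some "top")
    else if PySem.Str.isIn "## general app ideas" lower then (st.1, st.2.1, st.2.2.1, some "general")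
    else if PySem.Str.isIn "## technical / programming suggestions" lower then (st.1, st.2.1, st.2.2.1, some "tech")
    else
      let cur := if PySem.Str.startswith line "## " then none else st.2.2.2
      if cur = some "top" then (st.1 ++ [line], st.2.1, st.2.2.1, cur)
      else if cur = some "general" then (st.1, st.2.1 ++ [line], st.2.2.1, cur)
      else if cur = some "tech" then (st.1, st.2.1, st.2.2.1 ++ [line], cur)
      else (st.1, st.2.1, st.2.2.1, cur)

def extract_preview_lists_alt (markdown_text : String) : List String × List String × List String :=
  let st := (PySem.Str.splitlines markdown_text).foldl pvStepB ([], [], [], none)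
  (pvBullets st.1, pvBullets st.2.1, pvBullets st.2.2.1)

-- ===== PRECONDITION & SPEC =====
def Spec_extract_preview_lists (markdown_text : String) (out : List String × List String × List String) : Prop := out = extract_preview_lists_alt markdown_text
instance (markdown_text : String) (out : List String × List String × List String) : Decidable (Spec_extract_preview_lists markdown_text out) := by unfold Spec_extract_preview_lists; infer_instance

-- ===== CLAIM (what is proved, stated in full; the proofs are below) =====
def Claim_equal_extract_preview_lists : Prop := ∀ (markdown_text : String), Dom_extract_preview_lists markdown_text → Spec_extract_preview_lists markdown_text (extract_preview_lists markdown_text)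

-- ===== LEMMAS AND PROOFS =====

-- the coupling invariant between A's state and B's state
def pvRel (a b : List String × List String × List String × Option String) : Prop :=
  a.1 = pvBullets b.1 ∧ a.2.1 = pvBullets b.2.1 ∧ a.2.2.1 = pvBullets b.2.2.1 ∧ a.2.2.2 = b.2.2.2

lemma take5_fm_append {α β : Type} (p : α → Bool) (f : α → β) (ls : List α) (l : α) :
    ((((ls ++ [l]).filter p).map f)).take 5 =
      if p l = true ∧ (((ls.filter p).map f).take 5).length < 5
      then ((ls.filter p).map f).take 5 ++ [f l]
      else ((ls.filter p).map f).take 5 := by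
  rw [List.filter_append, List.map_append]
  by_cases hp : p l = true
  · rw [show List.filter p [l] = [l] from by simp [hp], List.map_cons, List.map_nil,
      List.take_append]
    by_cases h5 : ((ls.filter p).map f).length < 5
    · rw [if_pos ⟨hp, by rw [List.length_take]; omega⟩,
        List.take_of_length_le (Nat.le_of_lt h5),
        List.take_of_length_le (show ([f l]).length ≤ 5 - ((ls.filter p).map f).length from by
          rw [List.length_singleton]; omega)]
    · rw [if_neg (by
          intro hc
          have h2 := hc.2
          rw [List.length_take] at h2
          omega),
        show 5 - ((ls.filter p).map f).length = 0 from by omega]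
      simp
  · simp [hp]

lemma pvBullets_append (ls : List String) (l : String) :
    pvBullets (ls ++ [l]) =
      if PySem.Str.startswith l "- " = true ∧ (pvBullets ls).length < 5
      then pvBullets ls ++ [PySem.Str.strip (PySem.Str.slice l (some 2) none)]
      else pvBullets ls := by
  unfold pvBullets
  exact take5_fm_append _ _ ls l

lemma pvStep_rel (a b : List String × List String × List String × Option String) (raw : String)
    (h : pvRel a b) : pvRel (pvStepA a (PySem.Str.strip raw)) (pvStepB b raw) := by
  obtain ⟨a1, a2, a3, a4⟩ := a
  obtain ⟨b1, b2, b3, b4⟩ := b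
  obtain ⟨h1, h2, h3, h4⟩ := h
  dsimp only at h1 h2 h3 h4
  subst h1 h2 h3 h4
  unfold pvRel pvStepA pvStepB
  dsimp only
  split_ifs <;> simp_all [pvBullets_append]

lemma pvFold_rel (L : List String) (a b : List String × List String × List String × Option String)
    (h : pvRel a b) : pvRel ((L.map PySem.Str.strip).foldl pvStepA a) (L.foldl pvStepB b) := by
  induction L generalizing a b with
  | nil => exact h
  | cons x xs ih => exact ih _ _ (pvStep_rel a b x h)

-- ===== VERDICT (by name: the statement is the Claim_ definition above) =====
theorem extract_preview_lists_spec : Claim_equal_extract_preview_lists := by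
  intro s _
  unfold Spec_extract_preview_lists extract_preview_lists extract_preview_lists_alt
  have h := pvFold_rel (PySem.Str.splitlines s) ([], [], [], none) ([], [], [], none)
    (by exact ⟨by simp [pvBullets], by simp [pvBullets], by simp [pvBullets], rfl⟩)
  obtain ⟨h1, h2, h3, _⟩ := h
  dsimp only
  rw [h1, h2, h3]
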